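-- pv_equiv track=rewrite | github.com/lappelduvidee/bronychessai | che2ss.py | _attack_table
-- ===== SOURCE A (Python) =====
-- from typing import Generic, Iterable, Iterator, List, Optional, Tuple, Type, TypeVar
-- import typing
--
-- BB_EMPTY = 0
--
-- SQUARES=[A1, B1, C1, D1, E1, F1, G1, H1,A2, B2, C2, D2, E2, F2, G2, H2,A3, B3, C3, D3, E3, F3, G3, H3,A4, B4, C4, D4, E4, F4, G4, H4,A5, B5, C5, D5, E5, F5, G5, H5,A6, B6, C6, D6, E6, F6, G6, H6,A7, B7, C7, D7, E7, F7, G7, H7,A8, B8, C8, D8, E8, F8, G8, H8,]=range(64)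
--
-- BB_SQUARES = [BB_A1, BB_B1, BB_C1, BB_D1, BB_E1, BB_F1, BB_G1, BB_H1,BB_A2, BB_B2, BB_C2, BB_D2, BB_E2, BB_F2, BB_G2, BB_H2,BB_A3, BB_B3, BB_C3, BB_D3, BB_E3, BB_F3, BB_G3, BB_H3,BB_A4, BB_B4, BB_C4, BB_D4, BB_E4, BB_F4, BB_G4, BB_H4,BB_A5, BB_B5, BB_C5, BB_D5, BB_E5, BB_F5, BB_G5, BB_H5,BB_A6, BB_B6, BB_C6, BB_D6, BB_E6, BB_F6, BB_G6, BB_H6,BB_A7, BB_B7, BB_C7, BB_D7, BB_E7, BB_F7, BB_G7, BB_H7,BB_A8, BB_B8, BB_C8, BB_D8, BB_E8, BB_F8, BB_G8, BB_H8] = [1 << sq for sq in SQUARES]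
--
-- BB_RANKS = [BB_RANK_1,BB_RANK_2,BB_RANK_3,BB_RANK_4,BB_RANK_5,BB_RANK_6,BB_RANK_7,BB_RANK_8] = [0xff << (8 * i) for i in range(8)]
--
-- BB_FILES = [BB_FILE_A,BB_FILE_B,BB_FILE_C,BB_FILE_D,BB_FILE_E,BB_FILE_F,BB_FILE_G,BB_FILE_H] = [0x0101_0101_0101_0101 << i for i in range(8)]
--
-- def square_distance(a: int, b: int) -> int:
--     return max(abs(square_file(a) - square_file(b)), abs(square_rank(a) - square_rank(b)))
--
-- def square_file(square: int) -> int: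
--     return square & 7
--
-- def square_rank(square: int) -> int:
--     return square >> 3
--
-- def _edges(square: int) -> int:
--     return (((BB_RANK_1 | BB_RANK_8) & ~BB_RANKS[square_rank(square)]) |
--             ((BB_FILE_A | BB_FILE_H) & ~BB_FILES[square_file(square)]))
--
-- def _carry_rippler(mask: int) -> Iterator[int]:
--     subset = BB_EMPTY
--     while True:
--         yield subset
--         subset = (subset - mask) & mask
--         if not subset:
--             break
--
-- def _sliding_attacks(square: int, occupied: int, deltas: Iterable[int]) -> int:
--     attacks = BB_EMPTY
--     for delta in deltas:
--         sq = square
--         while True: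
--             sq += delta
--             if not (0 <= sq < 64) or square_distance(sq, sq - delta) > 2:
--                 break
--             attacks |= BB_SQUARES[sq]
--             if occupied & BB_SQUARES[sq]:
--                 break
--     return attacks
--
-- def _attack_table(deltas: List[int]) -> Tuple[List[int], List[typing.Dict[int, int]]]:
--     mask_table = []
--     attack_table = []
--     for square in SQUARES:
--         attacks = {}
--         mask = _sliding_attacks(square, 0, deltas) & ~_edges(square)
--         for subset in _carry_rippler(mask):
--             attacks[subset] = _sliding_attacks(square, subset, deltas)
--         attack_table.append(attacks)
--         mask_table.append(mask)
--     return mask_table, attack_table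
-- ===== SOURCE B (Python) =====
-- # B: per square, precompute the ray of squares each delta sweeps; the mask is the OR of
-- # all ray squares minus the board edges, the blocker subsets are generated by an iterative
-- # power-set list doubling over the mask's set bits (instead of the carry-rippler trick),
-- # and each subset's attack set is a scan of the precomputed rays.
--
-- BB_RANKS = [0xff << (8 * i) for i in range(8)]
-- BB_FILES = [0x0101_0101_0101_0101 << i for i in range(8)]
--
--
-- def _ray(square, delta):
--     """Bitboards of the squares swept from `square` by `delta`, in walk order."""
--     out = []
--     sq = square + delta
--     while 0 <= sq < 64 and max(abs((sq & 7) - ((sq - delta) & 7)),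
--                                abs((sq >> 3) - ((sq - delta) >> 3))) <= 2:
--         out.append(1 << sq)
--         sq += delta
--     return out
--
--
-- def _scan(rays, occupied):
--     """Union of each ray's prefix up to (and including) the first occupied square."""
--     attacks = 0
--     for ray in rays:
--         for bb in ray:
--             attacks |= bb
--             if occupied & bb:
--                 break
--     return attacks
--
--
-- def _attack_table(deltas):
--     mask_table = []
--     attack_table = []
--     for square in range(64):
--         rays = [_ray(square, delta) for delta in deltas]
--         edges = (((BB_RANKS[0] | BB_RANKS[7]) & ~BB_RANKS[square >> 3]) |
--                  ((BB_FILES[0] | BB_FILES[7]) & ~BB_FILES[square & 7]))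
--         mask = 0
--         for ray in rays:
--             for bb in ray:
--                 mask |= bb
--         mask &= ~edges
--         subsets = [0]
--         for sq in range(64):
--             if mask >> sq & 1:
--                 bit = 1 << sq
--                 subsets = subsets + [s | bit for s in subsets]
--         attack_table.append({s: _scan(rays, s) for s in subsets})
--         mask_table.append(mask)
--     return mask_table, attack_table
-- ===== Notes on version B (the rewrite author's own statement) =====
-- stated objective: alternative
-- what changed: B precomputes, per square, the list of squares each delta sweeps (its ray), derives the mask by OR-ing the rays, enumerates the blocker subsets by power-set list doubling over the mask's set bits instead of A's carry-rippler bit trick, and maps each subset to a scan of the precomputed rays instead of re-walking the board with index/distance checks per step.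
import Mathlib
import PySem

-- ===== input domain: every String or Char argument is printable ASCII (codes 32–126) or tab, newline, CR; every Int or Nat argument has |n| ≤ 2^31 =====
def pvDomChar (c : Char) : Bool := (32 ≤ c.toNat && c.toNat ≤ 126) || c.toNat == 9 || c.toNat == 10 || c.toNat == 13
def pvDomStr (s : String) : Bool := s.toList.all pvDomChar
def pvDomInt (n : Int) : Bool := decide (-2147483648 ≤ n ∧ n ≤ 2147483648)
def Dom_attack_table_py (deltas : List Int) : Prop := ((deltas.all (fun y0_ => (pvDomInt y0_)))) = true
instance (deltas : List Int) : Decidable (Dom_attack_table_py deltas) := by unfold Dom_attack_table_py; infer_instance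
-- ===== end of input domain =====

-- B precomputes, per square, the ray of squares each delta sweeps, derives the mask by OR-ing
-- the rays, generates the blocker subsets by power-set list doubling over the mask's set bits
-- (instead of A's carry-rippler trick), and maps each subset to a scan of the precomputed
-- rays (equal return value).

-- ===== PORT A =====
-- BB_SQUARES / BB_RANKS / BB_FILES are A's module constants ([1 << sq for sq in range(64)], …).
def BB_SQUARES : List Int := (PySem.List.pyRange 0 64 1).map (fun sq => (1:Int) <<< sq.toNat)
def BB_RANKS : List Int := (PySem.List.pyRange 0 8 1).map (fun i => (0xff:Int) <<< (8 * i).toNat)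
def BB_FILES : List Int := (PySem.List.pyRange 0 8 1).map (fun i => (0x0101010101010101:Int) <<< i.toNat)
def BB_RANK_1 : Int := 0xff
def BB_RANK_8 : Int := 0xff <<< 56
def BB_FILE_A : Int := 0x0101010101010101
def BB_FILE_H : Int := 0x0101010101010101 <<< 7

def pySquareFile (square : Int) : Int := PySem.Int.band square 7
def pySquareRank (square : Int) : Int := square >>> (3:Nat)
def pySquareDistance (a b : Int) : Int :=
  max |pySquareFile a - pySquareFile b| |pySquareRank a - pySquareRank b|

-- _edges; the list indices square_rank/square_file are always in range for the squares used,
-- so pyGetD with default 0 is exact here.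
def pyEdges (square : Int) : Int :=
  PySem.Int.bor
    (PySem.Int.band (PySem.Int.bor BB_RANK_1 BB_RANK_8)
      (Int.not (PySem.List.pyGetD BB_RANKS (pySquareRank square) 0)))
    (PySem.Int.band (PySem.Int.bor BB_FILE_A BB_FILE_H)
      (Int.not (PySem.List.pyGetD BB_FILES (pySquareFile square) 0)))

-- the inner `while True` of _sliding_attacks; fuel 128 exceeds the ≤ 64 in-range steps any
-- nonzero delta can take. (For delta = 0 CPython loops forever, so no return value is
-- observable there; both ports cut off at the same fuel, so equivalence still holds.)
def pySlideLoop (occupied delta : Int) : Nat → Int → Int → Int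
  | 0, _, attacks => attacks
  | fuel + 1, sq, attacks =>
    let sq' := sq + delta
    if ¬(0 ≤ sq' ∧ sq' < 64) ∨ 2 < pySquareDistance sq' (sq' - delta) then attacks
    else if PySem.Int.band occupied (PySem.List.pyGetD BB_SQUARES sq' 0) ≠ 0 then
      PySem.Int.bor attacks (PySem.List.pyGetD BB_SQUARES sq' 0)
    else pySlideLoop occupied delta fuel sq' (PySem.Int.bor attacks (PySem.List.pyGetD BB_SQUARES sq' 0))

def pySlidingAttacks (square occupied : Int) (deltas : List Int) : Int :=
  deltas.foldl (fun attacks delta => pySlideLoop occupied delta 128 square attacks) 0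

-- `for subset in _carry_rippler(mask): attacks[subset] = _sliding_attacks(...)`; the fuel
-- mask.toNat + 2 exceeds the 2^popcount(mask) ≤ mask + 1 subsets the rippler yields.
def pyRipplerLoop (square : Int) (deltas : List Int) (mask : Int) :
    Nat → Int → PySem.Dict Int Int → PySem.Dict Int Int
  | 0, _, d => d
  | fuel + 1, subset, d =>
    let d' := d.insert subset (pySlidingAttacks square subset deltas)
    let subset' := PySem.Int.band (subset - mask) mask
    if subset' = 0 then d' else pyRipplerLoop square deltas mask fuel subset' d'

def attack_table_py (deltas : List Int) : List Int × (List (List (Int × Int))) :=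
  let tables := (PySem.List.pyRange 0 64 1).foldl
    (fun (tables : List Int × List (List (Int × Int))) square =>
      let mask := PySem.Int.band (pySlidingAttacks square 0 deltas) (Int.not (pyEdges square))
      let attacks := pyRipplerLoop square deltas mask (mask.toNat + 2) 0 PySem.Dict.empty
      (tables.1 ++ [mask], tables.2 ++ [attacks.items]))
    ([], [])
  tables

-- ===== PORT B =====
def altRanks : List Int := (PySem.List.pyRange 0 8 1).map (fun i => (0xff:Int) <<< (8 * i).toNat)
def altFiles : List Int := (PySem.List.pyRange 0 8 1).map (fun i => (0x0101010101010101:Int) <<< i.toNat)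

-- _ray's while loop; same fuel bound as A's walker (any nonzero delta exits within 64 steps).
def altRayLoop (delta : Int) : Nat → Int → List Int
  | 0, _ => []
  | fuel + 1, sq =>
    if 0 ≤ sq ∧ sq < 64 ∧
        max |PySem.Int.band sq 7 - PySem.Int.band (sq - delta) 7|
            |(sq >>> (3:Nat)) - ((sq - delta) >>> (3:Nat))| ≤ 2 then
      ((1:Int) <<< ((sq.toNat : Int))) :: altRayLoop delta fuel (sq + delta)
    else []

def altRay (square delta : Int) : List Int := altRayLoop delta 128 (square + delta)

-- _scan's inner loop over one ray
def altScanRay (occupied : Int) : List Int → Int → Int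
  | [], attacks => attacks
  | bb :: rest, attacks =>
    if PySem.Int.band occupied bb ≠ 0 then PySem.Int.bor attacks bb
    else altScanRay occupied rest (PySem.Int.bor attacks bb)

def altScan (rays : List (List Int)) (occupied : Int) : Int :=
  rays.foldl (fun attacks ray => altScanRay occupied ray attacks) 0

def altEdges (square : Int) : Int :=
  PySem.Int.bor
    (PySem.Int.band
      (PySem.Int.bor (PySem.List.pyGetD altRanks 0 0) (PySem.List.pyGetD altRanks 7 0))
      (Int.not (PySem.List.pyGetD altRanks (square >>> (3:Nat)) 0)))
    (PySem.Int.band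
      (PySem.Int.bor (PySem.List.pyGetD altFiles 0 0) (PySem.List.pyGetD altFiles 7 0))
      (Int.not (PySem.List.pyGetD altFiles (PySem.Int.band square 7) 0)))

def attack_table_py_alt (deltas : List Int) : List Int × (List (List (Int × Int))) :=
  (PySem.List.pyRange 0 64 1).foldl
    (fun (tables : List Int × List (List (Int × Int))) square =>
      let rays := deltas.map (fun delta => altRay square delta)
      let edges := altEdges square
      let mask0 := rays.foldl (fun m ray => ray.foldl (fun m bb => PySem.Int.bor m bb) m) 0
      let mask := PySem.Int.band mask0 (Int.not edges)
      let subsets := (PySem.List.pyRange 0 64 1).foldl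
        (fun (subs : List Int) sq =>
          if PySem.Int.band (mask >>> sq.toNat) 1 ≠ 0 then
            subs ++ subs.map (fun s => PySem.Int.bor s ((1:Int) <<< sq.toNat))
          else subs) [0]
      let attacks := subsets.foldl
        (fun (d : PySem.Dict Int Int) s => d.insert s (altScan rays s)) PySem.Dict.empty
      (tables.1 ++ [mask], tables.2 ++ [attacks.items]))
    ([], [])

-- ===== PRECONDITION & SPEC =====
def Spec_attack_table_py (deltas : List Int) (out : List Int × (List (List (Int × Int)))) : Prop := out = attack_table_py_alt deltas
instance (deltas : List Int) (out : List Int × (List (List (Int × Int)))) : Decidable (Spec_attack_table_py deltas out) := by unfold Spec_attack_table_py; infer_instance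

-- ===== CLAIM (what is proved, stated in full; the proofs are below) =====
def Claim_equal_attack_table_py : Prop := ∀ (deltas : List Int), Dom_attack_table_py deltas → Spec_attack_table_py deltas (attack_table_py deltas)

-- ===== LEMMAS AND PROOFS =====

-- BB_SQUARES[s] is 1 << s for an in-range index
theorem bb_squares_eq (s : Int) (h0 : 0 ≤ s) (h1 : s < 64) :
    PySem.List.pyGetD BB_SQUARES s 0 = (1:Int) <<< ((s.toNat : Int)) := by
  unfold BB_SQUARES
  rw [PySem.List.pyGetD_map_pyRange_of_nonneg _ 64 s 0 h0 h1]

-- A's board walker equals B's ray scanner on B's precomputed ray (same fuel, same start)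
theorem slide_eq_scan (occupied delta : Int) :
    ∀ (fuel : Nat) (sq attacks : Int),
      pySlideLoop occupied delta fuel sq attacks =
        altScanRay occupied (altRayLoop delta fuel (sq + delta)) attacks := by
  intro fuel
  induction fuel with
  | zero => intro sq attacks; simp [pySlideLoop, altRayLoop, altScanRay]
  | succ f ih =>
    intro sq attacks
    rw [pySlideLoop, altRayLoop]
    by_cases h : 0 ≤ sq + delta ∧ sq + delta < 64 ∧
        max |PySem.Int.band (sq + delta) 7 - PySem.Int.band (sq + delta - delta) 7|
            |((sq + delta) >>> (3:Nat)) - ((sq + delta - delta) >>> (3:Nat))| ≤ 2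
    · have hdist : ¬(¬(0 ≤ sq + delta ∧ sq + delta < 64) ∨
          2 < pySquareDistance (sq + delta) (sq + delta - delta)) := by
        rw [not_or, not_not, not_lt]
        exact ⟨⟨h.1, h.2.1⟩, h.2.2⟩
      rw [if_neg hdist, if_pos h]
      simp only [altScanRay]
      rw [bb_squares_eq _ h.1 h.2.1]
      by_cases hocc : PySem.Int.band occupied ((1:Int) <<< (((sq + delta).toNat : Int))) ≠ 0
      · rw [if_pos hocc, if_pos hocc]
      · rw [if_neg hocc, if_neg hocc, ih]
    · have hdist : ¬(0 ≤ sq + delta ∧ sq + delta < 64) ∨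
          2 < pySquareDistance (sq + delta) (sq + delta - delta) := by
        simp only [pySquareDistance, pySquareFile, pySquareRank]
        simp only [not_and_or, not_le] at h
        rcases h with h | h | h
        · exact Or.inl (by omega)
        · exact Or.inl (by omega)
        · exact Or.inr h
      rw [if_pos hdist, if_neg h]
      simp only [altScanRay]

-- _sliding_attacks equals B's scan of the precomputed rays
theorem slidingAttacks_eq_scan (square occupied : Int) (deltas : List Int) :
    pySlidingAttacks square occupied deltas =
      altScan (deltas.map (fun delta => altRay square delta)) occupied := by
  unfold pySlidingAttacks altScan altRay
  rw [List.foldl_map]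
  apply PySem.List.foldl_congr_mem
  intro attacks delta _
  exact slide_eq_scan occupied delta 128 square attacks

-- with occupied = 0 the scanner never breaks: it is the plain OR-fold B uses for the mask
theorem scanRay_zero (ray : List Int) : ∀ (attacks : Int),
    altScanRay 0 ray attacks = ray.foldl (fun m bb => PySem.Int.bor m bb) attacks := by
  induction ray with
  | nil => intro attacks; simp [altScanRay]
  | cons bb rest ih =>
    intro attacks
    rw [altScanRay, List.foldl_cons]
    rw [if_neg (by simp [PySem.Int.band_comm 0 bb])]
    exact ih _

theorem scan_zero (rays : List (List Int)) :
    altScan rays 0 = rays.foldl (fun m ray => ray.foldl (fun m bb => PySem.Int.bor m bb) m) 0 := by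
  unfold altScan
  apply PySem.List.foldl_congr_mem
  intro m ray _
  exact scanRay_zero ray m

-- the two edge formulas agree (A's named constants are altRanks/altFiles entries)
theorem edges_eq (square : Int) : pyEdges square = altEdges square := by
  have hr : BB_RANKS = altRanks := rfl
  have hf : BB_FILES = altFiles := rfl
  have h1 : BB_RANK_1 = PySem.List.pyGetD altRanks 0 0 := by decide
  have h8 : BB_RANK_8 = PySem.List.pyGetD altRanks 7 0 := by decide
  have ha : BB_FILE_A = PySem.List.pyGetD altFiles 0 0 := by decide
  have hh : BB_FILE_H = PySem.List.pyGetD altFiles 7 0 := by decide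
  unfold pyEdges altEdges pySquareRank pySquareFile
  rw [hr, hf, h1, h8, ha, hh]

theorem testBit_add_pow (a h : Nat) (ha : a < 2^h) (i : Nat) :
    (a + 2^h).testBit i = (a.testBit i || decide (i = h)) := by
  rcases lt_trichotomy i h with hi | rfl | hi
  · rw [Nat.add_comm, Nat.testBit_two_pow_add_gt hi]
    simp [Nat.ne_of_lt hi]
  · rw [Nat.add_comm, Nat.testBit_two_pow_add_eq, Nat.testBit_lt_two_pow ha]
    simp
  · have h2 : 2^(h+1) ≤ 2^i := Nat.pow_le_pow_right (by omega) (by omega)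
    have h1 : a + 2^h < 2^i := by
      have : 2^h + 2^h = 2^(h+1) := by ring
      omega
    rw [Nat.testBit_lt_two_pow h1, Nat.testBit_lt_two_pow (by omega : a < 2^i)]
    simp; omega

theorem and_lt_pow (M' a h : Nat) (hM : M' < 2^h) : M' &&& a < 2^h :=
  Nat.lt_of_le_of_lt Nat.and_le_left hM

theorem and_add_pow_both (M' a h : Nat) (hM : M' < 2^h) (ha : a < 2^h) :
    (M' + 2^h) &&& (a + 2^h) = (M' &&& a) + 2^h := by
  apply Nat.eq_of_testBit_eq
  intro i
  rw [Nat.testBit_and, testBit_add_pow _ _ hM, testBit_add_pow _ _ ha,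
      testBit_add_pow _ _ (and_lt_pow M' a h hM), Nat.testBit_and]
  by_cases hi : i = h
  · subst hi
    simp [Nat.testBit_lt_two_pow hM, Nat.testBit_lt_two_pow ha]
  · simp [hi]

theorem and_add_pow_low (M' h : Nat) (hM : M' < 2^h) :
    (M' + 2^h) &&& (2^h - 1) = M' := by
  apply Nat.eq_of_testBit_eq
  intro i
  rw [Nat.testBit_and, testBit_add_pow _ _ hM, Nat.testBit_two_pow_sub_one]
  by_cases hi : i < h
  · simp [hi, Nat.ne_of_lt hi]
  · simp [hi]
    have : M' < 2^i := lt_of_lt_of_le hM (Nat.pow_le_pow_right (by omega) (by omega))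
    exact Nat.testBit_lt_two_pow this

theorem and_add_pow_small (M' a h : Nat) (hM : M' < 2^h) (ha : a < 2^h) :
    (M' + 2^h) &&& a = M' &&& a := by
  apply Nat.eq_of_testBit_eq
  intro i
  rw [Nat.testBit_and, testBit_add_pow _ _ hM, Nat.testBit_and]
  by_cases hi : i = h
  · subst hi
    simp [Nat.testBit_lt_two_pow ha]
  · simp [hi]

theorem lor_eq_add_pow (a h : Nat) (ha : a < 2^h) : a ||| 2^h = a + 2^h := by
  apply Nat.eq_of_testBit_eq
  intro i
  rw [Nat.testBit_or, testBit_add_pow _ _ ha, Nat.testBit_two_pow]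
  by_cases hi : i = h <;> simp [hi]
  exact fun hh => absurd hh (by omega)

theorem band_negSucc_natCast (u m : Nat) :
    PySem.Int.band (Int.negSucc u) ((m : Nat) : Int) = ((m - (m &&& u) : Nat) : Int) := by
  simp [PySem.Int.band, Int.negSucc_eq]
  omega

theorem cast_sub_negSucc (s m : Nat) (h : s < m) :
    ((s : Nat) : Int) - ((m : Nat) : Int) = Int.negSucc (m - s - 1) := by
  rw [Int.negSucc_eq]; omega

theorem band_sub_eq (s M' : Nat) (h : s < M') :
    PySem.Int.band (((s:Nat):Int) - ((M':Nat):Int)) ((M':Nat):Int) =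
      ((M' - (M' &&& (M' - s - 1)) : Nat) : Int) := by
  rw [cast_sub_negSucc s M' h, band_negSucc_natCast]

theorem step_first (s M' h : Nat) (hM : M' < 2^h) (hs : s < M') :
    PySem.Int.band (((s:Nat):Int) - (((M' + 2^h : Nat)):Int)) (((M' + 2^h : Nat)):Int) =
      PySem.Int.band (((s:Nat):Int) - ((M':Nat):Int)) ((M':Nat):Int) := by
  rw [band_sub_eq s M' hs, band_sub_eq s (M' + 2^h) (by omega)]
  have ha : M' - s - 1 < 2^h := by omega
  have h1 : M' + 2^h - s - 1 = (M' - s - 1) + 2^h := by omega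
  rw [h1, and_add_pow_both _ _ _ hM ha]
  have := Nat.and_le_left (n := M') (m := M' - s - 1)
  congr 1
  omega

theorem step_top (M' h : Nat) (hM : M' < 2^h) :
    PySem.Int.band (((M':Nat):Int) - (((M' + 2^h : Nat)):Int)) (((M' + 2^h : Nat)):Int) =
      (((2^h : Nat)):Int) := by
  rw [band_sub_eq M' (M' + 2^h) (by have : 0 < 2^h := Nat.two_pow_pos h; omega)]
  have h1 : M' + 2^h - M' - 1 = 2^h - 1 := by omega
  rw [h1, and_add_pow_low _ _ hM]
  congr 1
  omega

theorem step_second (s M' h : Nat) (hM : M' < 2^h) (hs : s < M') :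
    PySem.Int.band ((((s + 2^h : Nat)):Int) - (((M' + 2^h : Nat)):Int)) (((M' + 2^h : Nat)):Int) =
      (((M' - (M' &&& (M' - s - 1)) + 2^h : Nat)):Int) := by
  have hcast : (((s + 2^h : Nat)):Int) - (((M' + 2^h : Nat)):Int) =
      ((s:Nat):Int) - ((M':Nat):Int) := by push_cast; ring
  rw [hcast, cast_sub_negSucc s M' hs, band_negSucc_natCast,
      and_add_pow_small _ _ _ hM (by omega)]
  have := Nat.and_le_left (n := M') (m := M' - s - 1)
  congr 1
  omega

theorem band_zero_left (m : Int) : PySem.Int.band 0 m = 0 := by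
  rw [PySem.Int.band_comm]
  simp

theorem step_zero_iff (s M' : Nat) (hs : s ≤ M')
    (h : PySem.Int.band (((s:Nat):Int) - ((M':Nat):Int)) ((M':Nat):Int) = 0) : s = M' := by
  rcases Nat.eq_or_lt_of_le hs with rfl | hlt
  · rfl
  · rw [band_sub_eq s M' hlt] at h
    have h2 : M' - (M' &&& (M' - s - 1)) = 0 := by exact_mod_cast h
    have h3 := Nat.and_le_left (n := M') (m := M' - s - 1)
    have h4 := Nat.and_le_right (n := M') (m := M' - s - 1)
    omega

def ripSeq? (m : Int) : Nat → Int → Option (List Int)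
  | 0, _ => none
  | fuel + 1, s =>
    if PySem.Int.band (s - m) m = 0 then some [s]
    else (ripSeq? m fuel (PySem.Int.band (s - m) m)).map (s :: ·)

theorem rip_mono (m : Int) : ∀ (f g : Nat) (s : Int) (l : List Int), f ≤ g →
    ripSeq? m f s = some l → ripSeq? m g s = some l := by
  intro f
  induction f with
  | zero => intro g s l _ h; simp [ripSeq?] at h
  | succ f ih =>
    intro g s l hfg h
    obtain ⟨g', rfl⟩ : ∃ g', g = g' + 1 := ⟨g - 1, by omega⟩
    rw [ripSeq?] at h ⊢
    split at h
    · rename_i hn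
      rw [if_pos hn]
      exact h
    · rename_i hn
      rw [if_neg hn]
      rcases Option.map_eq_some_iff.mp h with ⟨l', hl', rfl⟩
      rw [ih g' _ l' (by omega) hl']
      rfl

theorem run_second (h M' : Nat) (hM : M' < 2^h) :
    ∀ (f : Nat) (s : Nat) (l : List Int), s ≤ M' →
      ripSeq? ((M':Nat):Int) f ((s:Nat):Int) = some l →
      ripSeq? (((M' + 2^h : Nat)):Int) f (((s + 2^h : Nat)):Int) =
        some (l.map (fun x => x + (((2^h : Nat)):Int))) := by
  intro f
  induction f with
  | zero => intro s l _ hyp; simp [ripSeq?] at hyp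
  | succ f ih =>
    intro s l hs hyp
    rw [ripSeq?] at hyp ⊢
    split at hyp
    · rename_i hn
      have hsM : s = M' := step_zero_iff s M' hs hn
      subst hsM
      have : PySem.Int.band ((((s + 2^h:Nat)):Int) - (((s + 2^h:Nat)):Int)) (((s + 2^h:Nat)):Int) = 0 := by
        rw [sub_self, band_zero_left]
      rw [if_pos this]
      obtain rfl := Option.some_inj.mp hyp
      simp
    · rename_i hn
      have hslt : s < M' := by
        rcases Nat.eq_or_lt_of_le hs with rfl | hlt
        · exfalso; apply hn; rw [sub_self, band_zero_left]
        · exact hlt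
      rcases Option.map_eq_some_iff.mp hyp with ⟨l', hl', rfl⟩
      have hstep := band_sub_eq s M' hslt
      set d := M' - (M' &&& (M' - s - 1)) with hd
      have hdle : d ≤ M' := by omega
      have hih := ih d l' hdle (by rw [← hstep]; exact hl')
      have hS3 := step_second s M' h hM hslt
      rw [hS3]
      have hne : (((d + 2^h:Nat)):Int) ≠ 0 := by
        have : 0 < 2^h := Nat.two_pow_pos h
        exact Int.natCast_ne_zero.mpr (by omega)
      rw [if_neg hne]
      rw [hih]
      simp only [Option.map_some, List.map_cons]
      congr 2

theorem run_first (h M' : Nat) (hM : M' < 2^h) :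
    ∀ (f : Nat) (s : Nat) (l : List Int), s ≤ M' →
      ripSeq? ((M':Nat):Int) f ((s:Nat):Int) = some l →
      ∀ (g : Nat) (r : List Int),
        ripSeq? (((M' + 2^h : Nat)):Int) g (((2^h : Nat)):Int) = some r →
        ripSeq? (((M' + 2^h : Nat)):Int) (f + g) ((s:Nat):Int) = some (l ++ r) := by
  intro f
  induction f with
  | zero => intro s l _ hyp; simp [ripSeq?] at hyp
  | succ f ih =>
    intro s l hs hyp g r hr
    rw [ripSeq?] at hyp
    have hfg : f + 1 + g = (f + g) + 1 := by omega
    rw [hfg, ripSeq?]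
    split at hyp
    · rename_i hn
      have hsM : s = M' := step_zero_iff s M' hs hn
      subst hsM
      obtain rfl := Option.some_inj.mp hyp
      have hS2 := step_top s h hM
      rw [hS2]
      have hne : (((2^h:Nat)):Int) ≠ 0 := by
        have : 0 < 2^h := Nat.two_pow_pos h
        exact Int.natCast_ne_zero.mpr (by omega)
      rw [if_neg hne]
      rw [rip_mono _ g (f + g) _ r (by omega) hr]
      rfl
    · rename_i hn
      have hslt : s < M' := by
        rcases Nat.eq_or_lt_of_le hs with rfl | hlt
        · exfalso; apply hn; rw [sub_self, band_zero_left]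
        · exact hlt
      rcases Option.map_eq_some_iff.mp hyp with ⟨l', hl', rfl⟩
      have hstep := band_sub_eq s M' hslt
      set d := M' - (M' &&& (M' - s - 1)) with hd
      have hdle : d ≤ M' := by omega
      have hS1 := step_first s M' h hM hslt
      rw [hS1, hstep]
      have hne : (((d:Nat)):Int) ≠ 0 := by
        intro h0
        apply hn
        rw [hstep, h0]
      rw [if_neg hne]
      rw [ih d l' hdle (by rw [← hstep]; exact hl') g r hr]
      rfl

def mSum : List Nat → Nat
  | [] => 0
  | h :: t => 2^h + mSum t

def DLp : List Nat → List Int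
  | [] => [0]
  | h :: t => DLp t ++ (DLp t).map (fun s => s + (((2^h : Nat)):Int))

theorem mSum_lt : ∀ (P : List Nat), List.Pairwise (· > ·) P →
    ∀ (h : Nat), (∀ x ∈ P, x < h) → mSum P < 2^h := by
  intro P
  induction P with
  | nil => intro _ h _; simp only [mSum]; exact Nat.two_pow_pos h
  | cons h' t ih =>
    intro hP h hlt
    rw [List.pairwise_cons] at hP
    have h1 : mSum t < 2^h' := ih hP.2 h' hP.1
    have h2 : 2^(h'+1) ≤ 2^h := Nat.pow_le_pow_right (by omega) (hlt h' (by simp))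
    have h3 : 2^(h'+1) = 2^h' + 2^h' := by ring
    simp only [mSum]
    omega

theorem pow_len_le : ∀ (P : List Nat), List.Pairwise (· > ·) P →
    2 ^ P.length ≤ mSum P + 1 := by
  intro P
  induction P with
  | nil => simp [mSum]
  | cons h' t ih =>
    intro hP
    rw [List.pairwise_cons] at hP
    have h1 := ih hP.2
    have h2 : mSum t < 2^h' := mSum_lt t hP.2 h' hP.1
    simp only [mSum, List.length_cons]
    have h3 : 2^(t.length + 1) = 2^t.length + 2^t.length := by ring
    omega

theorem runDL : ∀ (P : List Nat), List.Pairwise (· > ·) P →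
    ripSeq? ((mSum P : Nat) : Int) (2 ^ P.length) 0 = some (DLp P) := by
  intro P
  induction P with
  | nil =>
    intro _
    rw [show (2:Nat)^([] : List Nat).length = 0 + 1 by simp, ripSeq?]
    simp [mSum, DLp]
  | cons h t ih =>
    intro hP
    rw [List.pairwise_cons] at hP
    have hMlt : mSum t < 2^h := mSum_lt t hP.2 h hP.1
    have hIH := ih hP.2
    have hsecond := run_second h (mSum t) hMlt (2^t.length) 0 (DLp t) (by omega) (by exact_mod_cast hIH)
    have hfirst := run_first h (mSum t) hMlt (2^t.length) 0 (DLp t) (by omega) (by exact_mod_cast hIH)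
      (2^t.length) ((DLp t).map (fun x => x + (((2^h : Nat)):Int))) (by simpa using hsecond)
    have hlen : (2:Nat) ^ (h :: t).length = 2^t.length + 2^t.length := by
      simp [List.length_cons]; ring
    rw [hlen]
    have hm : ((mSum (h :: t) : Nat) : Int) = (((mSum t + 2^h : Nat)):Int) := by
      simp [mSum]; ring_nf
    rw [hm]
    simpa [DLp] using hfirst

def DLb : List Nat → List Int
  | [] => [0]
  | h :: t => DLb t ++ (DLb t).map (fun s => PySem.Int.bor s ((1:Int) <<< ((h:Nat):Int)))

theorem one_shl (k : Nat) : (1:Int) <<< ((k:Nat):Int) = ((2^k : Nat) : Int) := by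
  rw [show (1:Int) = ((1:Nat):Int) by simp, Int.shiftLeft_natCast]
  simp [Nat.shiftLeft_eq]

theorem DLp_mem : ∀ (P : List Nat), ∀ x ∈ DLp P, ∃ s' : Nat, x = ((s':Nat):Int) ∧ s' ≤ mSum P := by
  intro P
  induction P with
  | nil => intro x hx; simp [DLp] at hx; exact ⟨0, by simp [hx, mSum]⟩
  | cons h t ih =>
    intro x hx
    simp only [DLp, List.mem_append, List.mem_map] at hx
    rcases hx with hx | ⟨y, hy, rfl⟩
    · rcases ih x hx with ⟨s', rfl, hs⟩
      exact ⟨s', rfl, by simp only [mSum]; exact le_trans hs (Nat.le_add_left _ _)⟩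
    · rcases ih y hy with ⟨s', rfl, hs⟩
      refine ⟨s' + 2^h, by push_cast; ring, by simp only [mSum]; omega⟩

theorem DLb_eq_DLp : ∀ (P : List Nat), List.Pairwise (· > ·) P → DLb P = DLp P := by
  intro P
  induction P with
  | nil => intro _; rfl
  | cons h t ih =>
    intro hP
    rw [List.pairwise_cons] at hP
    have hMlt : mSum t < 2^h := mSum_lt t hP.2 h hP.1
    simp only [DLb, DLp, ih hP.2]
    congr 1
    apply List.map_congr_left
    intro x hx
    rcases DLp_mem t x hx with ⟨s', rfl, hs⟩
    rw [one_shl, PySem.Int.bor_natCast, lor_eq_add_pow s' h (lt_of_le_of_lt hs hMlt)]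
    push_cast; ring

def descBits (n m : Nat) : List Nat := ((List.range n).filter (fun i => m.testBit i)).reverse

theorem descBits_succ (n m : Nat) :
    descBits (n+1) m = if m.testBit n then n :: descBits n m else descBits n m := by
  unfold descBits
  rw [List.range_succ, List.filter_append]
  by_cases hb : m.testBit n
  · simp [hb]
  · simp [hb]

theorem descBits_sorted (n m : Nat) : List.Pairwise (· > ·) (descBits n m) := by
  unfold descBits
  rw [List.pairwise_reverse]
  exact List.Pairwise.sublist List.filter_sublist List.pairwise_lt_range

theorem mSum_descBits (n m : Nat) : mSum (descBits n m) = m % 2^n := by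
  induction n with
  | zero => simp [descBits, mSum, Nat.mod_one]
  | succ n ih =>
    rw [descBits_succ]
    have hsplit : m % 2^(n+1) = m % 2^n + 2^n * (m / 2^n % 2) := by
      rw [Nat.pow_succ, Nat.mod_mul]
    by_cases hb : m.testBit n
    · rw [if_pos hb]
      simp only [mSum, ih]
      rw [Nat.testBit_eq_decide_div_mod_eq] at hb
      simp at hb
      rw [hb, Nat.mul_one] at hsplit
      omega
    · rw [if_neg hb]
      rw [Nat.testBit_eq_decide_div_mod_eq] at hb
      simp at hb
      have h2 : m / 2^n % 2 = 0 := by omega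
      rw [h2, Nat.mul_zero] at hsplit
      rw [ih]
      omega

-- ---------- A's rippler loop as a fold over its subset sequence ----------

theorem rip_loop (square : Int) (deltas : List Int) (m : Int) :
    ∀ (f : Nat) (s : Int) (l : List Int) (d : PySem.Dict Int Int),
      ripSeq? m f s = some l →
      pyRipplerLoop square deltas m f s d =
        l.foldl (fun d t => d.insert t (pySlidingAttacks square t deltas)) d := by
  intro f
  induction f with
  | zero => intro s l d hyp; simp [ripSeq?] at hyp
  | succ f ih =>
    intro s l d hyp
    rw [ripSeq?] at hyp
    rw [pyRipplerLoop]
    split at hyp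
    · rename_i hn
      obtain rfl := Option.some_inj.mp hyp
      rw [if_pos hn]
      rfl
    · rename_i hn
      rw [if_neg hn]
      rcases Option.map_eq_some_iff.mp hyp with ⟨l', hl', rfl⟩
      rw [ih _ l' _ hl']
      rfl

-- ---------- B's doubling fold builds DLb of the mask's bit positions ----------

theorem test_bit_iff (m n : Nat) :
    (PySem.Int.band ((((m:Nat):Int)) >>> ((n:Nat):Int)) 1 ≠ 0) ↔ m.testBit n := by
  have h1 : ((m:Nat):Int) >>> ((n:Nat):Int) = ((m >>> n : Nat):Int) := Int.shiftRight_natCast m n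
  rw [h1, show (1:Int) = ((1:Nat):Int) by simp, PySem.Int.band_natCast,
      Nat.and_one_is_mod, Nat.shiftRight_eq_div_pow, Nat.testBit_eq_decide_div_mod_eq]
  constructor
  · intro h
    have : m / 2^n % 2 ≠ 0 := by exact_mod_cast fun h0 => h (by exact_mod_cast h0)
    simp
    omega
  · intro h
    simp at h
    exact_mod_cast by omega

theorem subsFold (m : Nat) : ∀ (n : Nat),
    (PySem.List.pyRange 0 ((n:Nat):Int) 1).foldl
      (fun (subs : List Int) sq =>
        if PySem.Int.band ((((m:Nat):Int)) >>> sq.toNat) 1 ≠ 0 then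
          subs ++ subs.map (fun s => PySem.Int.bor s ((1:Int) <<< (sq.toNat:Int)))
        else subs) [0] = DLb (descBits n m) := by
  intro n
  induction n with
  | zero =>
    rw [PySem.List.pyRange_one_eq_nil (by simp)]
    rfl
  | succ n ih =>
    have hc : (((n+1:Nat)):Int) = ((n:Nat):Int) + 1 := by push_cast; ring
    rw [hc, PySem.List.pyRange_one_succ_right (by exact_mod_cast Int.natCast_nonneg n),
        List.foldl_append, ih]
    simp only [List.foldl_cons, List.foldl_nil, Int.toNat_natCast]
    rw [descBits_succ]
    by_cases hb : m.testBit n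
    · rw [if_pos ((test_bit_iff m n).mpr hb), if_pos hb]
      rfl
    · rw [if_neg (fun hcon => hb ((test_bit_iff m n).mp hcon)), if_neg hb]

-- ---------- bounds for the computed mask ----------

theorem lor_lt (x y n : Nat) (hx : x < 2^n) (hy : y < 2^n) : x ||| y < 2^n := by
  apply Nat.lt_pow_two_of_testBit
  intro i hi
  rw [Nat.testBit_or,
    Nat.testBit_lt_two_pow (lt_of_lt_of_le hx (Nat.pow_le_pow_right (by omega) hi)),
    Nat.testBit_lt_two_pow (lt_of_lt_of_le hy (Nat.pow_le_pow_right (by omega) hi))]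
  rfl

theorem ray_mem (delta : Int) : ∀ (fuel : Nat) (sq : Int),
    ∀ bb ∈ altRayLoop delta fuel sq, ∃ k : Nat, k < 64 ∧ bb = (((2^k : Nat)):Int) := by
  intro fuel
  induction fuel with
  | zero => intro sq bb hbb; simp [altRayLoop] at hbb
  | succ f ih =>
    intro sq bb hbb
    rw [altRayLoop] at hbb
    split at hbb
    · rename_i hcond
      rcases List.mem_cons.mp hbb with rfl | htail
      · refine ⟨sq.toNat, by omega, ?_⟩
        exact one_shl sq.toNat
      · exact ih _ bb htail
    · simp at hbb

theorem ray_fold_bound (ray : List Int)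
    (hray : ∀ bb ∈ ray, ∃ k : Nat, k < 64 ∧ bb = (((2^k : Nat)):Int)) :
    ∀ (macc : Nat), macc < 2^64 →
      ∃ n : Nat, n < 2^64 ∧
        ray.foldl (fun m bb => PySem.Int.bor m bb) ((macc:Nat):Int) = ((n:Nat):Int) := by
  induction ray with
  | nil => intro macc hm; exact ⟨macc, hm, rfl⟩
  | cons bb rest ih =>
    intro macc hm
    rcases hray bb (by simp) with ⟨k, hk, rfl⟩
    rw [List.foldl_cons, PySem.Int.bor_natCast]
    exact ih (fun b hb => hray b (by simp [hb])) _
      (lor_lt _ _ _ hm (Nat.pow_lt_pow_right (by omega) hk))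

theorem rays_fold_bound (rays : List (List Int))
    (hrays : ∀ ray ∈ rays, ∀ bb ∈ ray, ∃ k : Nat, k < 64 ∧ bb = (((2^k : Nat)):Int)) :
    ∀ (macc : Nat), macc < 2^64 →
      ∃ n : Nat, n < 2^64 ∧
        rays.foldl (fun m ray => ray.foldl (fun m bb => PySem.Int.bor m bb) m) ((macc:Nat):Int) =
          ((n:Nat):Int) := by
  induction rays with
  | nil => intro macc hm; exact ⟨macc, hm, rfl⟩
  | cons ray rest ih =>
    intro macc hm
    rw [List.foldl_cons]
    rcases ray_fold_bound ray (hrays ray (by simp)) macc hm with ⟨n, hn, heq⟩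
    rw [heq]
    exact ih (fun r hr => hrays r (by simp [hr])) n hn

theorem band_toNat_le (n : Nat) (b : Int) :
    ∃ n' : Nat, n' ≤ n ∧ PySem.Int.band ((n:Nat):Int) b = ((n':Nat):Int) := by
  by_cases hb : (0:Int) ≤ b
  · obtain ⟨u, rfl⟩ := Int.eq_ofNat_of_zero_le hb
    rw [PySem.Int.band_natCast]
    exact ⟨n &&& u, Nat.and_le_left, rfl⟩
  · rw [Int.not_le] at hb
    have hbe : b = Int.negSucc ((-b-1).toNat) := by rw [Int.negSucc_eq]; omega
    rw [PySem.Int.band_comm, hbe, band_negSucc_natCast]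
    exact ⟨n - (n &&& (-b-1).toNat), by omega, rfl⟩

theorem mask_bound (deltas : List Int) (square : Int) (e : Int) :
    ∃ n : Nat, n < 2^64 ∧
      PySem.Int.band
        ((deltas.map (fun delta => altRay square delta)).foldl
          (fun m ray => ray.foldl (fun m bb => PySem.Int.bor m bb) m) 0)
        (Int.not e) = ((n:Nat):Int) := by
  have hrays : ∀ ray ∈ deltas.map (fun delta => altRay square delta),
      ∀ bb ∈ ray, ∃ k : Nat, k < 64 ∧ bb = (((2^k : Nat)):Int) := by
    intro ray hray bb hbb
    rcases List.mem_map.mp hray with ⟨delta, _, rfl⟩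
    exact ray_mem delta 128 _ bb hbb
  rcases rays_fold_bound _ hrays 0 (by norm_num) with ⟨n, hn, heq⟩
  simp only [Nat.cast_zero] at heq
  rw [heq]
  rcases band_toNat_le n (Int.not e) with ⟨n', hn', heq'⟩
  exact ⟨n', by omega, heq'⟩

-- ---------- per-square equality ----------

theorem step_eq (deltas : List Int) (square : Int)
    (tables : List Int × List (List (Int × Int))) :
    (let mask := PySem.Int.band (pySlidingAttacks square 0 deltas) (Int.not (pyEdges square))
     let attacks := pyRipplerLoop square deltas mask (mask.toNat + 2) 0 PySem.Dict.empty
     (tables.1 ++ [mask], tables.2 ++ [attacks.items])) =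
    (let rays := deltas.map (fun delta => altRay square delta)
     let edges := altEdges square
     let mask0 := rays.foldl (fun m ray => ray.foldl (fun m bb => PySem.Int.bor m bb) m) 0
     let mask := PySem.Int.band mask0 (Int.not edges)
     let subsets := (PySem.List.pyRange 0 64 1).foldl
       (fun (subs : List Int) sq =>
         if PySem.Int.band (mask >>> sq.toNat) 1 ≠ 0 then
           subs ++ subs.map (fun s => PySem.Int.bor s ((1:Int) <<< sq.toNat))
         else subs) [0]
     let attacks := subsets.foldl
       (fun (d : PySem.Dict Int Int) s => d.insert s (altScan rays s)) PySem.Dict.empty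
     (tables.1 ++ [mask], tables.2 ++ [attacks.items])) := by
  simp only
  have hmask : PySem.Int.band (pySlidingAttacks square 0 deltas) (Int.not (pyEdges square)) =
      PySem.Int.band
        ((deltas.map (fun delta => altRay square delta)).foldl
          (fun m ray => ray.foldl (fun m bb => PySem.Int.bor m bb) m) 0)
        (Int.not (altEdges square)) := by
    rw [slidingAttacks_eq_scan, scan_zero, edges_eq]
  rw [hmask]
  rcases mask_bound deltas square (altEdges square) with ⟨nm, hnm, hm⟩
  rw [hm]
  set P : List Nat := descBits 64 nm with hP
  have hsort : List.Pairwise (· > ·) P := descBits_sorted 64 nm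
  have hPmsum : mSum P = nm := by
    rw [hP, mSum_descBits]
    exact Nat.mod_eq_of_lt hnm
  -- B's subsets fold is the doubling list
  have hsubs : (PySem.List.pyRange 0 64 1).foldl
      (fun (subs : List Int) sq =>
        if PySem.Int.band ((((nm:Nat):Int)) >>> sq.toNat) 1 ≠ 0 then
          subs ++ subs.map (fun s => PySem.Int.bor s ((1:Int) <<< sq.toNat))
        else subs) [0] = DLb P := by
    have h64 : (64:Int) = ((64:Nat):Int) := by norm_num
    rw [h64]
    exact subsFold nm 64
  rw [hsubs, DLb_eq_DLp P hsort]
  -- A's rippler loop runs over the same list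
  have hrun : ripSeq? ((nm:Nat):Int) (2 ^ P.length) 0 = some (DLp P) := by
    rw [← hPmsum]
    exact runDL P hsort
  have htoNat : ((nm:Nat):Int).toNat = nm := Int.toNat_natCast nm
  have hfuel : 2 ^ P.length ≤ ((nm:Nat):Int).toNat + 2 := by
    have := pow_len_le P hsort
    rw [htoNat]
    omega
  have hrun2 := rip_mono _ _ _ _ _ hfuel hrun
  rw [rip_loop square deltas _ _ 0 _ PySem.Dict.empty hrun2]
  have hfun : (fun (d : PySem.Dict Int Int) t => d.insert t (pySlidingAttacks square t deltas)) =
      (fun (d : PySem.Dict Int Int) s =>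
        d.insert s (altScan (deltas.map (fun delta => altRay square delta)) s)) := by
    funext d t
    rw [slidingAttacks_eq_scan]
  rw [hfun]

-- ===== VERDICT (by name: the statement is the Claim_ definition above) =====
theorem attack_table_py_spec : Claim_equal_attack_table_py := by
  intro deltas _
  unfold Spec_attack_table_py attack_table_py attack_table_py_alt
  simp only
  apply PySem.List.foldl_congr_mem
  intro tables square _
  exact step_eq deltas square tables
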